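-- pv_equiv track=rewrite | github.com/victorbr92/advent-of-code-2020 | 2021/day_12/solution.py | can_add
-- ===== SOURCE A (Python) =====
-- from collections import deque, Counter
-- from typing import List
--
-- def can_add(node: str, path: List[str], part_2: bool):
--     to_add = True
--     if node == 'start':
--         to_add = False
--     elif node.lower() == node and node not in ['start', 'end']:
--         # only enters if it is a small node now
--         small_caves_path = [n for n in path if (n.lower() == n and n not in ['start', 'end'])]
--         small_caves_amount = Counter(small_caves_path)
--
--         if not part_2:
--             # check if this small cave is already there
--             if small_caves_amount[node] >= 1:
--                 to_add = False
--         else: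
--             # check if there is some small cave already with 2 and if
--             will_be_bigger_than_2 = small_caves_amount[node] >= 1
--             has_bigger_than_2 = any([small_caves_amount[v] >= 2 for v in small_caves_amount])
--             if will_be_bigger_than_2 and has_bigger_than_2:
--                 to_add = False
--
--     return to_add
-- ===== SOURCE B (Python) =====
-- def can_add(node, path, part_2):
--     if node == 'start':
--         return False
--     if node.lower() != node or node in ('start', 'end'):
--         return True
--     # sort the small caves of the path: duplicates become adjacent,
--     # so one scan with a `prev` slot detects both membership and any duplicate
--     smalls = sorted(n for n in path if n.lower() == n and n not in ('start', 'end'))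
--     present = False
--     dup = False
--     prev = None
--     for n in smalls:
--         if n == prev:
--             dup = True
--         if n == node:
--             present = True
--         prev = n
--     if not part_2:
--         return not present
--     return not (present and dup)
-- ===== Notes on version B (the rewrite author's own statement) =====
-- stated objective: alternative
-- what changed: Instead of building a Counter over the filtered path and then scanning the counter with any(), B sorts the filtered small caves and does one adjacent-comparison scan (a prev slot): duplicates become adjacent pairs and node-membership is read off the same scan.
import Mathlib
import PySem

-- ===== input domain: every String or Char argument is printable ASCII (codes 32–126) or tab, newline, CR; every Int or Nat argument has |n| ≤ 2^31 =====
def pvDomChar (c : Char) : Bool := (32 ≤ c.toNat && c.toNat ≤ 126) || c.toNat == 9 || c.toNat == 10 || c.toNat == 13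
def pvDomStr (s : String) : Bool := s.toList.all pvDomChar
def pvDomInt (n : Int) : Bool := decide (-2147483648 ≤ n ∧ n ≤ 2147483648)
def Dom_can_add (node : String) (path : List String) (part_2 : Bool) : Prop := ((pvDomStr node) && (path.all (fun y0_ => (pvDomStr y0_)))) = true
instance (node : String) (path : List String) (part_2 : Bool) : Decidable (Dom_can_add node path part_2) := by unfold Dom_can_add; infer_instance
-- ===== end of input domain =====

-- One honest line: B replaces A's Counter-over-filtered-path plus separate any()-scan
-- by sort-then-adjacent-scan (duplicates become neighbours); alternative algorithm, same outputs.

-- ===== PORT A =====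
-- n.lower() == n and n not in ['start', 'end']
def pvSmallA (n : String) : Bool := (PySem.Str.lower n == n) && !(n == "start" || n == "end")

def can_add (node : String) (path : List String) (part_2 : Bool) : Bool :=
  -- to_add = True; if/elif chain mutating to_add, then return to_add
  if node == "start" then false
  else if pvSmallA node then
    let small_caves_path := path.filter pvSmallA
    let small_caves_amount := PySem.Dict.counter small_caves_path
    if !part_2 then
      if 1 ≤ small_caves_amount.getD node 0 then false else true
    else
      let will_be_bigger_than_2 := decide (1 ≤ small_caves_amount.getD node 0)
      let has_bigger_than_2 :=
        (small_caves_amount.keys.map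
          (fun v => decide (2 ≤ small_caves_amount.getD v 0))).any id
      if will_be_bigger_than_2 && has_bigger_than_2 then false else true
  else true

-- ===== PORT B =====
-- n.lower() == n and n not in ('start', 'end')
def pvSmallB (n : String) : Bool := (PySem.Str.lower n == n) && !(n == "start" || n == "end")

-- one step of the adjacent-comparison scan; state = (prev, dup, present)
def pvStepB (node : String) (st : Option String × Bool × Bool) (n : String) :
    Option String × Bool × Bool :=
  (some n, st.2.1 || (st.1 == some n), st.2.2 || (n == node))

def can_add_alt (node : String) (path : List String) (part_2 : Bool) : Bool :=
  if node == "start" then false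
  else if !(PySem.Str.lower node == node) || node == "start" || node == "end" then true
  else
    let smalls := PySem.List.sorted (path.filter pvSmallB) (fun x => x) false
    let st := smalls.foldl (pvStepB node) ((none : Option String), false, false)
    if !part_2 then !st.2.2
    else !(st.2.2 && st.2.1)

-- ===== PRECONDITION & SPEC =====
def Spec_can_add (node : String) (path : List String) (part_2 : Bool) (out : Bool) : Prop := out = can_add_alt node path part_2
instance (node : String) (path : List String) (part_2 : Bool) (out : Bool) : Decidable (Spec_can_add node path part_2 out) := by unfold Spec_can_add; infer_instance

-- ===== CLAIM (what is proved, stated in full; the proofs are below) =====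
def Claim_equal_can_add : Prop := ∀ (node : String) (path : List String) (part_2 : Bool), Dom_can_add node path part_2 → Spec_can_add node path part_2 (can_add node path part_2)

-- ===== LEMMAS AND PROOFS =====

-- adjacent-duplicate detector on a chain starting with an optional previous element
def pvChainDup (p : Option String) : List String → Bool
  | [] => false
  | n :: r => (p == some n) || pvChainDup (some n) r

theorem pvFoldB_eval (node : String) (l : List String) :
    ∀ (p : Option String) (d pres : Bool),
    l.foldl (pvStepB node) (p, d, pres) =
      ((l.foldl (pvStepB node) (p, d, pres)).1, d || pvChainDup p l, pres || l.contains node) := by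
  induction l with
  | nil => intro p d pres; simp [pvChainDup]
  | cons n r ih =>
    intro p d pres
    simp only [List.foldl_cons, pvStepB]
    rw [ih]
    refine Prod.ext rfl (Prod.ext ?_ ?_)
    · simp [pvChainDup, Bool.or_assoc]
    · by_cases h : node = n
      · simp [h]
      · have hb : (n == node) = false := beq_eq_false_iff_ne.mpr (fun e => h e.symm)
        simp [h, hb]

-- on a nondecreasing chain, adjacent equality is exactly a duplicate
theorem pvChainDup_sorted_aux (a : String) (l : List String) :
    (a :: l).Pairwise (· ≤ ·) → pvChainDup (some a) l = decide (a ∈ l ∨ ¬ l.Nodup) := by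
  induction l generalizing a with
  | nil => intro _; simp [pvChainDup]
  | cons b r ih =>
    intro hp
    have hab : a ≤ b := (List.pairwise_cons.mp hp).1 b (by simp)
    have hpbr : (b :: r).Pairwise (· ≤ ·) := (List.pairwise_cons.mp hp).2
    have hbr : ∀ x ∈ r, b ≤ x := (List.pairwise_cons.mp hpbr).1
    rw [pvChainDup, ih b hpbr]
    by_cases he : a = b
    · subst he; simp
    · have hb : (a == b) = false := beq_eq_false_iff_ne.mpr he
      have har : a ∉ r := by
        intro hm
        exact he (le_antisymm hab (hbr a hm))
      simp [hb, List.nodup_cons, he, har]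

theorem pvChainDup_none (l : List String) (hp : l.Pairwise (· ≤ ·)) :
    pvChainDup none l = decide (¬ l.Nodup) := by
  cases l with
  | nil => simp [pvChainDup]
  | cons a r =>
    rw [pvChainDup]
    have := pvChainDup_sorted_aux a r hp
    rw [this]
    have har : ∀ x ∈ r, a ≤ x := (List.pairwise_cons.mp hp).1
    simp [List.nodup_cons]

-- A's "already present" test equals membership in the filtered path.
theorem pvCountA (node : String) (xs : List String) :
    (1 ≤ (PySem.Dict.counter xs).getD node 0) ↔ node ∈ xs := by
  rw [PySem.Dict.getD_counter]
  constructor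
  · intro h
    have : 1 ≤ xs.count node := by exact_mod_cast h
    exact List.count_pos_iff.mp this
  · intro h
    have : 1 ≤ xs.count node := List.count_pos_iff.mpr h
    exact_mod_cast this

-- A's any()-scan over the counter detects exactly a non-Nodup filtered path.
theorem pvAnyA (xs : List String) :
    ((PySem.Dict.counter xs).keys.map
        (fun v => decide (2 ≤ (PySem.Dict.counter xs).getD v 0))).any id = decide (¬ xs.Nodup) := by
  simp only [PySem.Dict.getD_counter, PySem.Dict.keys_counter, List.any_map]
  by_cases h : xs.Nodup
  · simp only [h, not_true_eq_false, decide_false]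
    rw [List.any_eq_false]
    intro v hv
    have h1 : xs.count v ≤ 1 := List.nodup_iff_count_le_one.mp h v
    simp only [Function.comp, id]
    intro h2
    have h3 : (2 : Int) ≤ (xs.count v : Int) := of_decide_eq_true h2
    omega
  · simp only [h, not_false_eq_true, decide_true]
    rw [List.any_eq_true]
    have hex : ∃ v, 1 < xs.count v := by
      by_contra hc
      push Not at hc
      exact h (List.nodup_iff_count_le_one.mpr fun v => by have := hc v; omega)
    rcases hex with ⟨v, hv⟩
    have hvm : v ∈ xs := List.count_pos_iff.mp (by omega)
    refine ⟨v, by simpa [PySem.Set.mem_ofList] using hvm, ?_⟩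
    simp only [Function.comp, id, decide_eq_true_eq]
    exact_mod_cast hv

-- ===== VERDICT (by name: the statement is the Claim_ definition above) =====
theorem can_add_spec : Claim_equal_can_add := by
  intro node path part_2 _
  unfold Spec_can_add can_add can_add_alt
  by_cases hstart : (node == "start") = true
  · simp [hstart]
  · by_cases hsm : pvSmallA node = true
    · have hl : (PySem.Str.lower node == node) = true := by
        unfold pvSmallA at hsm
        cases h : (PySem.Str.lower node == node) <;> simp_all
      have he : (node == "end") = false := by
        unfold pvSmallA at hsm
        cases h : (node == "end") <;> simp_all
      have hs' : (node == "start") = false := by simpa using hstart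
      simp only [hs', hl, he, hsm, Bool.not_true, Bool.or_self,
        Bool.false_eq_true, if_false, if_true]
      have hfil : path.filter pvSmallB = path.filter pvSmallA := rfl
      have hperm := PySem.List.sorted_perm (path.filter pvSmallB) (fun x => x) false
      have hpw : (PySem.List.sorted (path.filter pvSmallB) (fun x => x) false).Pairwise (· ≤ ·) := by
        have := PySem.List.sorted_pairwise (xs := path.filter pvSmallB) (key := fun x => x)
        simpa using this
      have hmem : (PySem.List.sorted (path.filter pvSmallB) (fun x => x) false).contains node
          = (path.filter pvSmallA).contains node := by
        by_cases hm : node ∈ path.filter pvSmallA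
        · simp [PySem.List.mem_sorted, hfil, hm]
        · simp [PySem.List.mem_sorted, hfil, hm]
      have hnd : (¬ (PySem.List.sorted (path.filter pvSmallB) (fun x => x) false).Nodup)
          ↔ ¬ (path.filter pvSmallA).Nodup := by
        rw [hperm.nodup_iff, hfil]
      have hpres : ((PySem.List.sorted (path.filter pvSmallB) (fun x => x) false).foldl
          (pvStepB node) ((none : Option String), false, false)).2.2
          = (path.filter pvSmallA).contains node := by
        rw [pvFoldB_eval]
        show (false || _) = _
        rw [Bool.false_or]
        exact hmem
      have hdup : ((PySem.List.sorted (path.filter pvSmallB) (fun x => x) false).foldl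
          (pvStepB node) ((none : Option String), false, false)).2.1
          = decide (¬ (path.filter pvSmallA).Nodup) := by
        rw [pvFoldB_eval]
        show (false || _) = _
        rw [Bool.false_or, pvChainDup_none _ hpw]
        exact decide_eq_decide.mpr hnd
      have h1 : decide (1 ≤ (PySem.Dict.counter (path.filter pvSmallA)).getD node 0)
          = (path.filter pvSmallA).contains node := by
        by_cases hpr : node ∈ path.filter pvSmallA
        · have hc : (path.filter pvSmallA).contains node = true := by simpa using hpr
          rw [hc]
          exact decide_eq_true ((pvCountA node _).mpr hpr)
        · have hc : (path.filter pvSmallA).contains node = false := by simpa using hpr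
          rw [hc]
          exact decide_eq_false (fun hle => hpr ((pvCountA node _).mp hle))
      by_cases hp2 : part_2 = true
      · simp only [hp2, Bool.not_true, Bool.false_eq_true, if_false]
        rw [pvAnyA, h1, hpres, hdup]
        cases hcb : (path.filter pvSmallA).contains node <;>
        cases hdb : decide (¬ (path.filter pvSmallA).Nodup) <;> rfl
      · have hp2' : part_2 = false := eq_false_of_ne_true hp2
        simp only [hp2', Bool.not_false, if_true]
        rw [hpres]
        cases hc : (path.filter pvSmallA).contains node
        · rw [if_neg (of_decide_eq_false (h1.trans hc))]; rfl
        · rw [if_pos (of_decide_eq_true (h1.trans hc))]; rfl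
    · have hsm' : pvSmallA node = false := by simpa using hsm
      unfold pvSmallA at hsm'
      have hs' : (node == "start") = false := by simpa using hstart
      cases hl : (PySem.Str.lower node == node) <;>
      cases he : (node == "end") <;>
        simp_all
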